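-- pv_equiv track=rewrite | github.com/teaplusottp/ARES_THE_MAZE | Source/plugin/getInput.py | check_first_vertical
-- ===== SOURCE A (Python) =====
-- def check_first_vertical(maze):
--     rows, cols = len(maze), len(maze[0])
--     for col in range(cols):
--         found_block = False
--         for row in range(rows):
--             if maze[row][col] == '#':
--                 found_block = True
--             elif not found_block and maze[row][col] == ' ':
--                 maze[row][col] = ''
--     return maze
-- ===== SOURCE B (Python) =====
-- def check_first_vertical(maze):
--     rows, cols = len(maze), len(maze[0])
--     for col in range(cols):
--         idx = rows
--         for row in range(rows):
--             if maze[row][col] == '#':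
--                 idx = row
--                 break
--         for row in range(idx):
--             if maze[row][col] == ' ':
--                 maze[row][col] = ''
--     return maze
-- ===== Notes on version B (the rewrite author's own statement) =====
-- stated objective: alternative
-- what changed: Per column, B first finds the index of the first '#' (defaulting to rows) with an early-break search, then blanks ' ' cells in a separate second pass over only the rows above that index, instead of A's single full-column scan carrying a found_block flag.
import Mathlib
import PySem

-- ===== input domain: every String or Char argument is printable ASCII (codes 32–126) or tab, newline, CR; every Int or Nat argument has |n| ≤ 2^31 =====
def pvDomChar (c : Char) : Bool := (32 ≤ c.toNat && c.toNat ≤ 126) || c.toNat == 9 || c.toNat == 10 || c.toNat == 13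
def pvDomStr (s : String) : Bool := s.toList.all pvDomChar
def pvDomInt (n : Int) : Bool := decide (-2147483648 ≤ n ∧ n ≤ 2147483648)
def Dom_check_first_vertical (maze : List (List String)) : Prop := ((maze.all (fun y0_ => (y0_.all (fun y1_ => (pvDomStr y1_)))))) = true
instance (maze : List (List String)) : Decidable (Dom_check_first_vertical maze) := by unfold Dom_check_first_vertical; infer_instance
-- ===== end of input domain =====

-- B separates each column's work into an early-exit search for the first '#' followed by a
-- blanking pass over only the rows above it (objective: alternative decomposition, same cost).
-- Both Pythons mutate `maze` in place identically; the equivalence proved here is about the return value.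

-- ===== PORT A =====
-- maze[row][col], read with Python indexing (rows/cols here are always in range under Pre_)
def pvCell (m : List (List String)) (row col : Int) : String :=
  ((PySem.List.pyGet? ((PySem.List.pyGet? m row).getD []) col).getD "")

-- maze[row][col] = v  (indices produced by range(...) are nonnegative, so .toNat is exact)
def pvSetCell (m : List (List String)) (row col : Int) (v : String) : List (List String) :=
  m.set row.toNat (((PySem.List.pyGet? m row).getD []).set col.toNat v)

-- body of A's inner `for row` loop, state = (maze, found_block)
def pvInnerA (col : Int) (st : List (List String) × Bool) (row : Int) : List (List String) × Bool :=
  if pvCell st.1 row col = "#" then (st.1, true)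
  else if st.2 = false ∧ pvCell st.1 row col = " " then (pvSetCell st.1 row col "", st.2)
  else st

def check_first_vertical (maze : List (List String)) : List (List String) :=
  let rows : Int := maze.length
  let cols : Int := (maze.headD []).length
  (PySem.List.pyRange 0 cols 1).foldl
    (fun m col => ((PySem.List.pyRange 0 rows 1).foldl (pvInnerA col) (m, false)).1) maze

-- ===== PORT B =====
-- B's first inner loop: `idx = rows; for row in range(rows): if maze[row][col]=='#': idx = row; break`
def pvFirstHash (m : List (List String)) (col : Int) : List Int → Int → Int
  | [], idx => idx
  | r :: rest, idx => if pvCell m r col = "#" then r else pvFirstHash m col rest idx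

-- body of B's second inner loop (blanking pass)
def pvInnerB (col : Int) (m : List (List String)) (row : Int) : List (List String) :=
  if pvCell m row col = " " then pvSetCell m row col "" else m

def check_first_vertical_alt (maze : List (List String)) : List (List String) :=
  let rows : Int := maze.length
  let cols : Int := (maze.headD []).length
  (PySem.List.pyRange 0 cols 1).foldl
    (fun m col =>
      let idx := pvFirstHash m col (PySem.List.pyRange 0 rows 1) rows
      (PySem.List.pyRange 0 idx 1).foldl (pvInnerB col) m) maze

-- ===== PRECONDITION & SPEC =====
-- Python A raises IndexError on an empty maze (maze[0]) and whenever some row is shorter than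
-- len(maze[0]); Pre_ excludes exactly those inputs.
def Pre_check_first_vertical (maze : List (List String)) : Prop :=
  maze ≠ [] ∧ ∀ r ∈ maze, (maze.headD []).length ≤ r.length
instance (maze : List (List String)) : Decidable (Pre_check_first_vertical maze) := by
  unfold Pre_check_first_vertical; infer_instance

def pvWitness_check_first_vertical : List (List String) := [[" ", "#"], ["#", " "]]

def Spec_check_first_vertical (maze : List (List String)) (out : List (List String)) : Prop := out = check_first_vertical_alt maze
instance (maze : List (List String)) (out : List (List String)) : Decidable (Spec_check_first_vertical maze out) := by unfold Spec_check_first_vertical; infer_instance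

-- ===== CLAIM (what is proved, stated in full; the proofs are below) =====
def Claim_equal_check_first_vertical : Prop := ∀ (maze : List (List String)), Dom_check_first_vertical maze → Pre_check_first_vertical maze → Spec_check_first_vertical maze (check_first_vertical maze)

-- ===== LEMMAS AND PROOFS =====

lemma pvFirstHash_cons (m : List (List String)) (col r idx : Int) (rest : List Int) :
    pvFirstHash m col (r :: rest) idx
      = if pvCell m r col = "#" then r else pvFirstHash m col rest idx := rfl

-- Once found_block is true, A's inner loop never changes the maze again.
lemma foldl_innerA_true (col : Int) : ∀ (l : List Int) (m : List (List String)),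
    l.foldl (pvInnerA col) (m, true) = (m, true) := by
  intro l
  induction l with
  | nil => intro m; rfl
  | cons r rest ih =>
    intro m
    have h : pvInnerA col (m, true) r = (m, true) := by
      unfold pvInnerA; split_ifs with h1 h2 <;> simp_all
    simp [List.foldl, h, ih]

-- Writing a cell at row a does not change any cell of a different (nonnegative) row.
lemma cell_set_ne (m : List (List String)) (a r col col' : Int) (v : String)
    (hne : r ≠ a) (hr : 0 ≤ r) (ha : 0 ≤ a) :
    pvCell (pvSetCell m a col v) r col' = pvCell m r col' := by
  unfold pvCell pvSetCell
  simp only [PySem.List.pyGet?_of_nonneg _ hr]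
  rw [List.getElem?_set_ne (by omega)]

lemma firstHash_congr (col : Int) (m m' : List (List String)) :
    ∀ (l : List Int) (idx : Int), (∀ r ∈ l, pvCell m' r col = pvCell m r col) →
    pvFirstHash m' col l idx = pvFirstHash m col l idx := by
  intro l
  induction l with
  | nil => intro idx _; rfl
  | cons r rest ih =>
    intro idx h
    rw [pvFirstHash_cons, pvFirstHash_cons, h r (by simp)]
    split_ifs with h1
    · rfl
    · exact ih idx (fun x hx => h x (by simp [hx]))

lemma firstHash_mem_or_default (m : List (List String)) (col : Int) :
    ∀ (l : List Int) (idx : Int), pvFirstHash m col l idx = idx ∨ pvFirstHash m col l idx ∈ l := by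
  intro l
  induction l with
  | nil => intro idx; exact Or.inl rfl
  | cons r rest ih =>
    intro idx
    rw [pvFirstHash_cons]
    split_ifs with h1
    · exact Or.inr (by simp)
    · rcases ih idx with h | h
      · exact Or.inl h
      · exact Or.inr (by simp [h])

-- The two inner-loop decompositions agree column by column.
lemma step_eq (col b : Int) : ∀ (n : Nat) (a : Int) (m : List (List String)),
    (b - a).toNat = n → 0 ≤ a →
    ((PySem.List.pyRange a b 1).foldl (pvInnerA col) (m, false)).1
      = (PySem.List.pyRange a (pvFirstHash m col (PySem.List.pyRange a b 1) b) 1).foldl (pvInnerB col) m := by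
  intro n
  induction n with
  | zero =>
    intro a m hn _
    have hba : b ≤ a := by omega
    rw [PySem.List.pyRange_one_eq_nil hba]
    simp [pvFirstHash, PySem.List.pyRange_one_eq_nil hba]
  | succ n ih =>
    intro a m hn ha
    have hab : a < b := by omega
    rw [PySem.List.pyRange_one_cons hab]
    have hmem : ∀ r ∈ PySem.List.pyRange (a+1) b 1, a + 1 ≤ r ∧ r < b := by
      intro r hr; exact (PySem.List.mem_pyRange_one.mp hr)
    by_cases h1 : pvCell m a col = "#"
    · -- first '#' found at row a: A stops modifying, B blanks nothing
      have hA : pvInnerA col (m, false) a = (m, true) := by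
        unfold pvInnerA; rw [if_pos h1]
      rw [List.foldl_cons, hA, foldl_innerA_true, pvFirstHash_cons, if_pos h1]
      rw [PySem.List.pyRange_one_eq_nil (le_refl a)]
      rfl
    · have hidx : pvFirstHash m col (a :: PySem.List.pyRange (a+1) b 1) b
          = pvFirstHash m col (PySem.List.pyRange (a+1) b 1) b := by
        rw [pvFirstHash_cons, if_neg h1]
      have hgt : ∀ m'' : List (List String),
          a < pvFirstHash m'' col (PySem.List.pyRange (a+1) b 1) b := by
        intro m''
        rcases firstHash_mem_or_default m'' col (PySem.List.pyRange (a+1) b 1) b with h | h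
        · omega
        · have := (PySem.List.mem_pyRange_one.mp h).1; omega
      by_cases h2 : pvCell m a col = " "
      · -- blank row a in both versions, then recurse on the updated maze
        have hstep : pvInnerA col (m, false) a = (pvSetCell m a col "", false) := by
          unfold pvInnerA; rw [if_neg h1, if_pos ⟨rfl, h2⟩]
        set m' := pvSetCell m a col "" with hm'
        have hcells : ∀ r ∈ PySem.List.pyRange (a+1) b 1, pvCell m' r col = pvCell m r col := by
          intro r hr
          exact cell_set_ne m a r col col "" (by have := (hmem r hr).1; omega)
            (by have := (hmem r hr).1; omega) ha
        have hcongr := firstHash_congr col m m' (PySem.List.pyRange (a+1) b 1) b hcells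
        rw [List.foldl_cons, hstep, ih (a+1) m' (by omega) (by omega)]
        rw [hidx, ← hcongr]
        rw [PySem.List.pyRange_one_cons (hgt m')]
        rw [List.foldl_cons]
        have hB : pvInnerB col m a = m' := by unfold pvInnerB; rw [if_pos h2]
        rw [hB, hcongr]
      · -- row a untouched in both versions
        have hstep : pvInnerA col (m, false) a = (m, false) := by
          unfold pvInnerA; rw [if_neg h1, if_neg (by simp [h2])]
        rw [List.foldl_cons, hstep, ih (a+1) m (by omega) (by omega)]
        rw [hidx]
        rw [PySem.List.pyRange_one_cons (hgt m)]
        rw [List.foldl_cons]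
        have hB : pvInnerB col m a = m := by unfold pvInnerB; rw [if_neg h2]
        rw [hB]

-- ===== VERDICT (by name: the statement is the Claim_ definition above) =====
theorem check_first_vertical_spec : Claim_equal_check_first_vertical := by
  intro maze _ _
  unfold Spec_check_first_vertical
  simp only [check_first_vertical, check_first_vertical_alt]
  have hf : (fun (m : List (List String)) (col : Int) =>
        ((PySem.List.pyRange 0 (maze.length : Int) 1).foldl (pvInnerA col) (m, false)).1)
      = (fun (m : List (List String)) (col : Int) =>
        (PySem.List.pyRange 0 (pvFirstHash m col (PySem.List.pyRange 0 (maze.length : Int) 1) (maze.length : Int)) 1).foldl (pvInnerB col) m) := by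
    funext m col
    exact step_eq col (maze.length : Int) ((maze.length : Int) - 0).toNat 0 m rfl (le_refl 0)
  rw [hf]
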